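-- pv_equiv track=rewrite | github.com/ipeternella/pystrukts | pystrukts/dynamic/rod_cutting.py | cut_rod_max_revenue
-- ===== SOURCE A (Python) =====
-- from typing import List
--
-- def cut_rod_max_revenue(length: int, prices: List[int]) -> int:
--     """
--     Computes the maximum revenue obtained by cutting up a rod of given length
--     and sellings its cut pieces based on the prices given by the prices argument.
--     The rod can only be divided into integral pieces (integers), so min. length == 1.
--     The prices list must be of size length + 1 (to include the price zero at ix == 0).
--
--     Example:
--                                    v˜˜˜˜ each ix holds the price of a rod of ix length!
--     >>> cut_rod_max_revenue(4, [0, 1, 5, 8, 9])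
--     >>> 10  # maximum revenue
--     """
--     if len(prices) < length + 1:
--         raise ValueError("Prices list is too short for the given rod length.")
--
--     if length == 0:
--         return prices[0]
--
--     if length == 1:
--         return prices[1]
--
--     max_revenue = 0
--
--     for i in range(1, length + 1):  # goes until length
--         max_revenue = max(max_revenue, prices[i] + cut_rod_max_revenue(length - i, prices))
--
--     return max_revenue
-- ===== SOURCE B (Python) =====
-- from typing import List
--
-- def cut_rod_max_revenue(length: int, prices: List[int]) -> int:
--     # Bottom-up DP over rod lengths 0..length (O(length^2) instead of A's exponential recursion).
--     if len(prices) < length + 1: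
--         raise ValueError("Prices list is too short for the given rod length.")
--     if length < 0:
--         return 0  # no cuts possible, no revenue
--     r = [0] * (length + 1)
--     r[0] = prices[0]
--     if length >= 1:
--         r[1] = prices[1]
--     for n in range(2, length + 1):
--         r[n] = max([0] + [prices[i] + r[n - i] for i in range(1, n + 1)])
--     return r[length]
-- ===== Notes on version B (the rewrite author's own statement) =====
-- stated objective: faster
-- what changed: Replaces A's exponential top-down recursion (recomputing every sub-length) with a bottom-up DP table over rod lengths 0..length; intended as faster (a timing run measured B 26x at n=64, A timing out at larger sizes).
import Mathlib
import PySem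

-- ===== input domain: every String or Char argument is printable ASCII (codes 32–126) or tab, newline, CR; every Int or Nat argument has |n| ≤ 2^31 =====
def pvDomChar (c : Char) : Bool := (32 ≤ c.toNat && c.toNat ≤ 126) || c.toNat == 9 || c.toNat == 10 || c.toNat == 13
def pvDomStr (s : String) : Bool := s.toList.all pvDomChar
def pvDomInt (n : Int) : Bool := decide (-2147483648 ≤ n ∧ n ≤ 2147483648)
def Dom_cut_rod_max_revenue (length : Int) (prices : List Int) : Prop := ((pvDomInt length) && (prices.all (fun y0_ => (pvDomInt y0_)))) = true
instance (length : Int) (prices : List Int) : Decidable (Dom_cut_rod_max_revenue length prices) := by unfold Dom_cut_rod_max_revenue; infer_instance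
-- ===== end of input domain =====

-- B replaces A's exponential top-down recursion by a bottom-up DP table over lengths 0..length
-- (intended as faster; a timing run measured B 26x at n=64, with A timing out at larger sizes).
-- Return-value equivalence only; neither program mutates its arguments.

-- ===== PORT A =====
-- Literal port of A's top-down recursion; the first branch is Python's `raise ValueError`
-- (excluded by Pre_), where the port returns 0.
def cut_rod_max_revenue (length : Int) (prices : List Int) : Int :=
  if (prices.length : Int) < length + 1 then 0  -- raise ValueError (outside Pre_)
  else if length = 0 then PySem.List.pyGetD prices 0 0
  else if length = 1 then PySem.List.pyGetD prices 1 0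
  else
    (PySem.List.pyRange 1 (length + 1)).attach.foldl
      (fun acc i =>
        max acc (PySem.List.pyGetD prices i.1 0 + cut_rod_max_revenue (length - i.1) prices)) 0
termination_by length.toNat
decreasing_by
  have h := PySem.List.mem_pyRange_one.mp i.2
  omega

-- ===== PORT B =====
-- r[n] for n in range(2, length+1): r[n] = max([0] + [prices[i] + r[n-i] for i in range(1, n+1)])
-- (the literal 0 heading Python's max-list is the fold's initial value)
def pvStep (prices : List Int) (r : List Int) (n : Nat) : List Int :=
  r ++ [((List.range' 1 n).map (fun i => prices.getD i 0 + r.getD (n - i) 0)).foldl max 0]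

-- the table r after the loop: r[0] = prices[0], r[1] = prices[1] (when length >= 1), then the loop
def pvTable (prices : List Int) (L : Nat) : List Int :=
  (List.range' 2 (L - 1)).foldl (pvStep prices)
    (if L = 0 then [prices.getD 0 0] else [prices.getD 0 0, prices.getD 1 0])

def cut_rod_max_revenue_alt (length : Int) (prices : List Int) : Int :=
  if (prices.length : Int) < length + 1 then 0  -- raise ValueError (outside Pre_)
  else if length < 0 then 0
  else (pvTable prices length.toNat).getD length.toNat 0

-- ===== PRECONDITION & SPEC =====
-- Pre_ excludes exactly the inputs where A raises ValueError (prices shorter than length+1).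
def Pre_cut_rod_max_revenue (length : Int) (prices : List Int) : Prop :=
  length + 1 ≤ (prices.length : Int)
instance (length : Int) (prices : List Int) : Decidable (Pre_cut_rod_max_revenue length prices) := by
  unfold Pre_cut_rod_max_revenue; infer_instance
def pvWitness_cut_rod_max_revenue : Int × List Int := (4, [0, 1, 5, 8, 9])

def Spec_cut_rod_max_revenue (length : Int) (prices : List Int) (out : Int) : Prop := out = cut_rod_max_revenue_alt length prices
instance (length : Int) (prices : List Int) (out : Int) : Decidable (Spec_cut_rod_max_revenue length prices out) := by unfold Spec_cut_rod_max_revenue; infer_instance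

-- ===== CLAIM (what is proved, stated in full; the proofs are below) =====
def Claim_equal_cut_rod_max_revenue : Prop := ∀ (length : Int) (prices : List Int), Dom_cut_rod_max_revenue length prices → Pre_cut_rod_max_revenue length prices → Spec_cut_rod_max_revenue length prices (cut_rod_max_revenue length prices)

-- ===== LEMMAS AND PROOFS =====

-- unfolding A's loop case without the `attach` used for termination
lemma cutA_unfold (length : Int) (prices : List Int)
    (hp : ¬ (prices.length : Int) < length + 1) (h0 : length ≠ 0) (h1 : length ≠ 1) :
    cut_rod_max_revenue length prices =
      (PySem.List.pyRange 1 (length + 1)).foldl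
        (fun acc i =>
          max acc (PySem.List.pyGetD prices i 0 + cut_rod_max_revenue (length - i) prices)) 0 := by
  rw [cut_rod_max_revenue]
  simp [hp, h0, h1]

lemma pvTable_succ (prices : List Int) (L : Nat) (h : 1 ≤ L) :
    pvTable prices (L + 1) = pvStep prices (pvTable prices L) (L + 1) := by
  unfold pvTable
  rw [if_neg (by omega : ¬ L + 1 = 0), if_neg (by omega : ¬ L = 0)]
  have h1 : L + 1 - 1 = (L - 1) + 1 := by omega
  rw [h1, List.range'_1_concat, List.foldl_append, List.foldl_cons, List.foldl_nil]
  have h2 : 2 + (L - 1) = L + 1 := by omega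
  rw [h2]

lemma pvTable_main (prices : List Int) (L : Nat) (hp : (L : Int) + 1 ≤ (prices.length : Int)) :
    (pvTable prices L).length = L + 1 ∧
    ∀ k : Nat, k ≤ L → (pvTable prices L).getD k 0 = cut_rod_max_revenue (k : Int) prices := by
  induction L with
  | zero =>
    constructor
    · simp [pvTable]
    · intro k hk
      interval_cases k
      rw [cut_rod_max_revenue]
      simp only [Nat.cast_zero]
      rw [if_neg (by omega : ¬ (prices.length : Int) < 0 + 1), if_pos trivial]
      have h := PySem.List.pyGetD_natCast prices 0 0
      norm_num at h
      simp [pvTable, h]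
  | succ L ih =>
    rcases Nat.eq_zero_or_pos L with hL | hL
    · subst hL
      have hn : ¬ (prices.length : Int) < (1 : Int) + 1 := by push_cast at hp ⊢; omega
      have h0 : ¬ (prices.length : Int) < (0 : Int) + 1 := by omega
      constructor
      · simp [pvTable]
      · intro k hk
        interval_cases k
        · rw [cut_rod_max_revenue]
          simp only [Nat.cast_zero]
          rw [if_neg (by omega : ¬ (prices.length : Int) < 0 + 1), if_pos trivial]
          have h := PySem.List.pyGetD_natCast prices 0 0
          norm_num at h
          simp [pvTable, h]
        · rw [cut_rod_max_revenue]
          simp only [Nat.cast_one]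
          rw [if_neg (by omega : ¬ (prices.length : Int) < 1 + 1),
            if_neg (by omega : ¬ (1 : Int) = 0), if_pos trivial]
          have h := PySem.List.pyGetD_natCast prices 1 0
          norm_num at h
          simp [pvTable, h]
    · have hp' : (L : Int) + 1 ≤ (prices.length : Int) := by push_cast at hp ⊢; omega
      obtain ⟨hlen, hval⟩ := ih hp'
      rw [pvTable_succ prices L hL]
      constructor
      · simp [pvStep, hlen]
      · intro k hk
        rcases Nat.lt_or_ge k (L + 1) with hkL | hkL
        · -- old entries are preserved by the append
          have : (pvStep prices (pvTable prices L) (L + 1)).getD k 0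
               = (pvTable prices L).getD k 0 := by
            unfold pvStep
            rw [List.getD_eq_getElem?_getD, List.getElem?_append_left (by omega),
                ← List.getD_eq_getElem?_getD]
          rw [this]
          exact hval k (by omega)
        · -- the new entry equals A's recursive value at L+1
          have hk' : k = L + 1 := by omega
          subst hk'
          have hnew : (pvStep prices (pvTable prices L) (L + 1)).getD (L + 1) 0
              = ((List.range' 1 (L + 1)).map
                  (fun i => prices.getD i 0 + (pvTable prices L).getD (L + 1 - i) 0)).foldl max 0 := by
            unfold pvStep
            rw [List.getD_eq_getElem?_getD, List.getElem?_append_right (by omega)]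
            simp [hlen]
          rw [hnew]
          have hA := cutA_unfold ((L : Int) + 1) prices (by push_cast at hp ⊢; omega)
            (by omega) (by exact_mod_cast by omega)
          have hcast0 : ((L + 1 : Nat) : Int) = (L : Int) + 1 := by push_cast; ring
          rw [hcast0, hA]
          rw [PySem.List.pyRange_one, List.range'_eq_map_range]
          simp only [List.foldl_map]
          have hcast : ((L : Int) + 1 + 1 - 1).toNat = L + 1 := by omega
          rw [hcast]
          apply PySem.List.foldl_congr_mem
          intro acc x hx
          have hxlt : x < L + 1 := List.mem_range.mp hx
          have e1 : ((1 : Int) + (x : Int)) = ((1 + x : Nat) : Int) := by push_cast; ring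
          have e2 : (L : Int) + 1 - ((1 + x : Nat) : Int) = ((L - x : Nat) : Int) := by
            push_cast [Nat.cast_sub (by omega : x ≤ L)]; ring
          rw [e1, PySem.List.pyGetD_natCast, e2, ← hval (L - x) (by omega)]
          simp [Nat.add_comm 1 x]

-- ===== VERDICT (by name: the statement is the Claim_ definition above) =====
theorem cut_rod_max_revenue_spec : Claim_equal_cut_rod_max_revenue := by
  intro length prices _ hpre
  unfold Spec_cut_rod_max_revenue cut_rod_max_revenue_alt
  unfold Pre_cut_rod_max_revenue at hpre
  have hg : ¬ (prices.length : Int) < length + 1 := by omega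
  rcases lt_or_ge length 0 with hneg | hpos
  · -- negative length: A's loop range is empty, B returns 0
    rw [cutA_unfold length prices hg (by omega) (by omega)]
    rw [PySem.List.pyRange_one_eq_nil (by omega)]
    simp [hneg, hg]
  · have hL : length = ((length.toNat : Nat) : Int) := by omega
    obtain ⟨_, hval⟩ := pvTable_main prices length.toNat (by omega)
    have := hval length.toNat le_rfl
    simp [hg, not_lt.mpr hpos, ← hL] at this ⊢
    omega
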